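-- pv_equiv track=rewrite | github.com/olegJF/Checkio | disconnected_users.py | dfs
-- ===== SOURCE A (Python) =====
-- def dfs(_graph, start, visited=None):
--     if visited is None:
--         visited = set()
--     visited.add(start)
--     if start in _graph:
--         for next in _graph[start] - visited:
--             dfs(_graph, next, visited)
--     return visited
-- ===== SOURCE B (Python) =====
-- def dfs(_graph, start, visited=None):
--     if visited is None:
--         visited = set()
--     visited.add(start)
--     # explicit stack instead of recursion; reversed push keeps the recursive visit order
--     stack = list(_graph[start] - visited)[::-1] if start in _graph else []
--     while stack:
--         node = stack.pop()
--         if node not in visited: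
--             visited.add(node)
--             if node in _graph:
--                 stack.extend(list(_graph[node] - visited)[::-1])
--     return visited
-- ===== Notes on version B (the rewrite author's own statement) =====
-- stated objective: alternative
-- what changed: Replaces A's recursive DFS (which re-calls itself over each snapshot of unvisited neighbours) with an explicit stack-driven while-loop that pops a node, skips it if already visited, and pushes its unvisited neighbours; no recursion remains.
import Mathlib
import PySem

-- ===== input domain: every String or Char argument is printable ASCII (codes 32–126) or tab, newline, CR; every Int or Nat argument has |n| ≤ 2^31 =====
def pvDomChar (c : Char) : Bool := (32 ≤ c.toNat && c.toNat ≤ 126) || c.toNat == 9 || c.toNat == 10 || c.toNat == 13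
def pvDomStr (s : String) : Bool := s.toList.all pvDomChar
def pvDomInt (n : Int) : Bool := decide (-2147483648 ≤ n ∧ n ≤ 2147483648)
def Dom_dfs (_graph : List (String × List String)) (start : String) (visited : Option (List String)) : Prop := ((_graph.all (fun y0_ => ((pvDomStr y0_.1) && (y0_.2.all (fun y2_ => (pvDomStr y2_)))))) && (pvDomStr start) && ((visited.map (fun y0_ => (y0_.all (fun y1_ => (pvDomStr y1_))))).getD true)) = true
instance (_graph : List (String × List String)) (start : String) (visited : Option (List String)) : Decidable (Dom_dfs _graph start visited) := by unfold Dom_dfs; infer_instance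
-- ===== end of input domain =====

-- B replaces A's recursion by an explicit stack loop (same decomposition of the work, no recursion);
-- A mutates the caller's `visited` set in place — the equivalence proved here is about the RETURN value only.
-- Python sets are modelled as PySem.Set (list of distinct elements); set iteration order is not modelled, and
-- the returned set is order-independent; the ports fix one concrete (matching) order.

-- shared vocabulary of the two ports / the termination measures:
-- all strings occurring in the graph (keys and adjacency members)
def pvNodes (g : List (String × List String)) : List String := g.flatMap (fun p => p.1 :: p.2)
-- the graph nodes not yet visited (termination measure of both ports)
def pvUnvis (g : List (String × List String)) (v : List String) : Finset String :=
  (pvNodes g).toFinset \ v.toFinset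

theorem pvCard_mono (g : List (String × List String)) {v w : List String}
    (h : ∀ x ∈ v, x ∈ w) : (pvUnvis g w).card ≤ (pvUnvis g v).card := by
  apply Finset.card_le_card
  apply Finset.sdiff_subset_sdiff (Finset.Subset.refl _)
  intro x hx
  exact List.mem_toFinset.mpr (h x (List.mem_toFinset.mp hx))

theorem pvCard_add_le (g : List (String × List String)) (v : PySem.Set String) (n : String) :
    (pvUnvis g (PySem.Set.add v n)).card ≤ (pvUnvis g v).card := by
  apply pvCard_mono
  intro x hx
  simp [PySem.Set.mem_add, hx]

theorem pvCard_lt (g : List (String × List String)) {v w : List String} {n : String}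
    (hsub : ∀ x ∈ v, x ∈ w) (hn : n ∈ pvNodes g) (hnv : n ∉ v) (hnw : n ∈ w) :
    (pvUnvis g w).card < (pvUnvis g v).card := by
  apply Finset.card_lt_card
  constructor
  · apply Finset.sdiff_subset_sdiff (Finset.Subset.refl _)
    intro x hx
    exact List.mem_toFinset.mpr (hsub x (List.mem_toFinset.mp hx))
  · intro hcon
    have h1 : n ∈ pvUnvis g v := by
      simp [pvUnvis, List.mem_toFinset, hn, hnv]
    have h2 := hcon h1
    simp [pvUnvis, List.mem_toFinset, hnw] at h2

theorem pvCard_add_lt (g : List (String × List String)) {v : PySem.Set String} {n : String}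
    (hn : n ∈ pvNodes g) (hnv : n ∉ v) :
    (pvUnvis g (PySem.Set.add v n)).card < (pvUnvis g v).card := by
  apply pvCard_lt g (fun x hx => (PySem.Set.mem_add v n x).mpr (Or.inl hx)) hn hnv
  exact (PySem.Set.mem_add v n n).mpr (Or.inr rfl)

-- a key of the graph is one of its nodes
theorem pvKey_mem_nodes {g : List (String × List String)} {n : String} {ns : List String}
    (h : (PySem.Dict.mk g).get? n = some ns) : n ∈ pvNodes g := by
  simp only [PySem.Dict.get?, Option.map_eq_some_iff] at h
  obtain ⟨p, hp, hval⟩ := h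
  have hmem := List.mem_of_find?_eq_some hp
  have hkey : p.1 = n := by simpa using List.find?_some hp
  simp only [pvNodes, List.mem_flatMap]
  exact ⟨p, hmem, by simp [hkey]⟩

-- ===== PORT A =====
-- the body of Python's dfs: add start, and if it is a key, recurse over the snapshot _graph[start] - visited
-- (the for-loop is the foldl).  The recursion is guarded by fuel; `dfs` below supplies |pvNodes|+2, an upper
-- bound on the recursion depth (each nesting level either visits a fresh graph node or stops).
def dfsAF (g : List (String × List String)) : Nat → String → PySem.Set String → PySem.Set String
  | 0, _, v => v
  | fuel+1, n, v =>
    let v1 := PySem.Set.add v n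
    match (PySem.Dict.mk g).get? n with
    | some ns => (PySem.Set.diff (PySem.Set.ofList ns) v1).foldl (fun w m => dfsAF g fuel m w) v1
    | none => v1

def dfs (_graph : List (String × List String)) (start : String) (visited : Option (List String)) : List String :=
  let v0 : PySem.Set String :=
    match visited with
    | none => PySem.Set.empty
    | some vs => PySem.Set.ofList vs
  dfsAF _graph ((pvNodes _graph).length + 2) start v0

-- ===== PORT B =====
-- the while-loop of B.  The Python stack (top = last, neighbours pushed reversed) is modelled with the top at
-- the list HEAD, so the two reversals cancel: pop = head, extend-with-reversed = prepend in order.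
def loopB (g : List (String × List String)) : List String → PySem.Set String → PySem.Set String
  | [], v => v
  | n :: rest, v =>
    if PySem.Set.contains v n then loopB g rest v
    else
      let v' := PySem.Set.add v n
      match hg : (PySem.Dict.mk g).get? n with
      | some ns => loopB g (PySem.Set.diff (PySem.Set.ofList ns) v' ++ rest) v'
      | none => loopB g rest v'
  termination_by l v => ((pvUnvis g v).card, l.length)
  decreasing_by
  · exact Prod.Lex.right _ (Nat.lt_succ_self _)
  · rename_i hc
    exact Prod.Lex.left _ _ (pvCard_add_lt g (pvKey_mem_nodes hg)
      (fun hm => hc (List.contains_iff_mem.mpr hm)))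
  · rcases Nat.lt_or_eq_of_le (pvCard_add_le g v n) with h | h
    · exact Prod.Lex.left _ _ h
    · rw [h]; exact Prod.Lex.right _ (Nat.lt_succ_self _)

def dfs_alt (_graph : List (String × List String)) (start : String) (visited : Option (List String)) : List String :=
  let v0 : PySem.Set String :=
    match visited with
    | none => PySem.Set.empty
    | some vs => PySem.Set.ofList vs
  let v1 := PySem.Set.add v0 start
  let stack : List String :=
    match (PySem.Dict.mk _graph).get? start with
    | some ns => PySem.Set.diff (PySem.Set.ofList ns) v1
    | none => []
  loopB _graph stack v1

-- ===== PRECONDITION & SPEC =====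
def Spec_dfs (_graph : List (String × List String)) (start : String) (visited : Option (List String)) (out : List String) : Prop := out = dfs_alt _graph start visited
instance (_graph : List (String × List String)) (start : String) (visited : Option (List String)) (out : List String) : Decidable (Spec_dfs _graph start visited out) := by unfold Spec_dfs; infer_instance

-- ===== CLAIM (what is proved, stated in full; the proofs are below) =====
def Claim_equal_dfs : Prop := ∀ (_graph : List (String × List String)) (start : String) (visited : Option (List String)), Dom_dfs _graph start visited → Spec_dfs _graph start visited (dfs _graph start visited)

-- ===== LEMMAS AND PROOFS =====

-- m is a visited key all of whose neighbours are visited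
def pvClosed (g : List (String × List String)) (v : PySem.Set String) (m : String) : Prop :=
  ∀ ns, (PySem.Dict.mk g).get? m = some ns → PySem.Set.diff (PySem.Set.ofList ns) v = []

-- loop invariant: every pending node that is already visited is closed
def pvInv (g : List (String × List String)) (v : PySem.Set String) (l : List String) : Prop :=
  ∀ m ∈ l, m ∈ v → pvClosed g v m

theorem pvDiff_eq_nil_iff (s t : List String) :
    PySem.Set.diff s t = [] ↔ ∀ x ∈ s, x ∈ t := by
  simp [PySem.Set.diff, List.filter_eq_nil_iff, PySem.Set.contains, List.contains_iff_mem]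

theorem pvMem_diff {s t : List String} {x : String} :
    x ∈ PySem.Set.diff s t ↔ x ∈ s ∧ x ∉ t := by
  simp [PySem.Set.diff, List.mem_filter, PySem.Set.contains, List.contains_iff_mem]

theorem pvClosed_mono {g : List (String × List String)} {v w : PySem.Set String} {m : String}
    (hsub : ∀ x ∈ v, x ∈ w) (h : pvClosed g v m) : pvClosed g w m := by
  intro ns hns
  rw [pvDiff_eq_nil_iff]
  intro x hx
  exact hsub x ((pvDiff_eq_nil_iff _ _).mp (h ns hns) x hx)

theorem pvPrefix_add (v : PySem.Set String) (n : String) : v <+: PySem.Set.add v n := by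
  unfold PySem.Set.add
  split
  · exact List.prefix_refl _
  · exact List.prefix_append _ _

-- the visited set only grows through the loop (as a prefix, hence as a subset)
theorem loopB_prefix (g : List (String × List String)) (l : List String) (v : PySem.Set String) :
    v <+: loopB g l v := by
  fun_induction loopB g l v with
  | case1 => exact List.prefix_refl _
  | case2 n rest v hc ih => exact ih
  | case3 n rest v hc v' ns hns ih =>
    exact List.IsPrefix.trans (pvPrefix_add _ _) ih
  | case4 n rest v hc v' hns ih =>
    exact List.IsPrefix.trans (pvPrefix_add _ _) ih

theorem loopB_subset {g : List (String × List String)} {l : List String} {v : PySem.Set String} :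
    ∀ x ∈ v, x ∈ loopB g l v :=
  fun _ hx => (loopB_prefix g l v).subset hx

-- every pending node ends up visited
theorem loopB_mem (g : List (String × List String)) (l : List String) (v : PySem.Set String) :
    ∀ m ∈ l, m ∈ loopB g l v := by
  fun_induction loopB g l v with
  | case1 => intro m hm; cases hm
  | case2 n rest v hc ih =>
    intro m hm
    rcases List.mem_cons.mp hm with h | h
    · exact h ▸ loopB_subset n (List.contains_iff_mem.mp hc)
    · exact ih m h
  | case3 n rest v hc v' ns hns ih =>
    intro m hm
    rcases List.mem_cons.mp hm with h | h
    · exact h ▸ loopB_subset n ((PySem.Set.mem_add v n n).mpr (Or.inr rfl))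
    · exact ih m (List.mem_append_right _ h)
  | case4 n rest v hc v' hns ih =>
    intro m hm
    rcases List.mem_cons.mp hm with h | h
    · exact h ▸ loopB_subset n ((PySem.Set.mem_add v n n).mpr (Or.inr rfl))
    · exact ih m h

-- every node the loop newly visits is closed in the final set
theorem loopB_closed (g : List (String × List String)) (l : List String) (v : PySem.Set String) :
    ∀ m, m ∈ loopB g l v → m ∉ v → pvClosed g (loopB g l v) m := by
  fun_induction loopB g l v with
  | case1 => intro m hm hnv; exact absurd hm hnv
  | case2 n rest v hc ih => exact ih
  | case3 n rest v hc v' ns hns ih =>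
    intro m hm hnv
    by_cases hmn : m = n
    · subst hmn
      intro ns' hns'
      rw [hns] at hns'; injection hns' with h; subst h
      rw [pvDiff_eq_nil_iff]
      intro x hx
      by_cases hxv : x ∈ v'
      · exact loopB_subset x hxv
      · exact loopB_mem g _ v' x (List.mem_append_left _ (pvMem_diff.mpr ⟨hx, hxv⟩))
    · refine ih m hm ?_
      intro hv'
      rcases (PySem.Set.mem_add v n m).mp hv' with h | h
      · exact hnv h
      · exact hmn h
  | case4 n rest v hc v' hns ih =>
    intro m hm hnv
    by_cases hmn : m = n
    · subst hmn
      intro ns' hns'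
      rw [hns] at hns'; cases hns'
    · refine ih m hm ?_
      intro hv'
      rcases (PySem.Set.mem_add v n m).mp hv' with h | h
      · exact hnv h
      · exact hmn h

-- the loop consumes its stack left to right
theorem loopB_append (g : List (String × List String)) (a : List String) (v : PySem.Set String) :
    ∀ b, loopB g (a ++ b) v = loopB g b (loopB g a v) := by
  fun_induction loopB g a v with
  | case1 => intro b; rfl
  | case2 n rest v hc ih =>
    intro b
    rw [List.cons_append, loopB]
    simp only [hc, if_true]
    exact ih b
  | case3 n rest v hc v' ns hns ih =>
    intro b
    rw [List.cons_append, loopB, if_neg hc]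
    split
    · rename_i ns' hg'
      rw [hns] at hg'; injection hg' with h; subst h
      show loopB g ((PySem.Set.ofList ns).diff (v.add n) ++ (rest ++ b)) (v.add n) =
        loopB g b (loopB g ((PySem.Set.ofList ns).diff (v.add n) ++ rest) (v.add n))
      rw [← List.append_assoc]
      exact ih b
    · rename_i hg'
      rw [hns] at hg'; cases hg'
  | case4 n rest v hc v' hns ih =>
    intro b
    rw [List.cons_append, loopB, if_neg hc]
    split
    · rename_i ns' hg'
      rw [hns] at hg'; cases hg'
    · exact ih b

-- MAIN SIMULATION: A's fold over a pending list equals B's loop on the same stack, given the invariant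
-- and enough fuel (more than the number of unvisited graph nodes).
theorem pvSim (g : List (String × List String)) :
    ∀ k f l v, (pvUnvis g v).card = k → k < f → pvInv g v l →
      l.foldl (fun w m => dfsAF g f m w) v = loopB g l v := by
  intro k
  induction k using Nat.strong_induction_on with
  | _ k IH =>
  intro f l
  induction l generalizing f with
  | nil => intro v _ _ _; simp [loopB]
  | cons n rest ihl =>
    intro v hk hf hInv
    obtain ⟨f', rfl⟩ : ∃ f', f = f' + 1 := ⟨f - 1, by omega⟩
    rw [List.foldl_cons, loopB]
    by_cases hc : PySem.Set.contains v n
    · -- n already visited: A's recursive call is a no-op by the invariant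
      have hnv : n ∈ v := List.contains_iff_mem.mp hc
      have hstep : dfsAF g (f' + 1) n v = v := by
        rw [dfsAF]
        have hadd : PySem.Set.add v n = v := by simp [PySem.Set.add, hnv]
        cases hg : (PySem.Dict.mk g).get? n with
        | some ns =>
          simp only [hadd, hg]
          have : PySem.Set.diff (PySem.Set.ofList ns) v = [] :=
            hInv n (by simp) hnv ns hg
          rw [this]; rfl
        | none => simp [hadd, hg]
      rw [hstep, if_pos hc]
      exact ihl (f' + 1) v hk hf (fun m hm => hInv m (List.mem_cons_of_mem _ hm))
    · -- n fresh: A opens n exactly as B does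
      have hnv : n ∉ v := fun h => hc (List.contains_iff_mem.mpr h)
      rw [if_neg hc]
      have hsubv' : ∀ x ∈ v, x ∈ PySem.Set.add v n :=
        fun x hx => (PySem.Set.mem_add v n x).mpr (Or.inl hx)
      cases hg : (PySem.Dict.mk g).get? n with
      | some ns =>
        set v' := PySem.Set.add v n with hv'
        set d := PySem.Set.diff (PySem.Set.ofList ns) v' with hd
        have hstep : dfsAF g (f' + 1) n v = d.foldl (fun w m => dfsAF g f' m w) v' := by
          rw [dfsAF]; simp only [hg]; rfl
        have hkd : (pvUnvis g v').card < k := hk ▸ pvCard_add_lt g (pvKey_mem_nodes hg) hnv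
        have h1 : d.foldl (fun w m => dfsAF g f' m w) v' = loopB g d v' := by
          refine IH _ hkd f' d v' rfl (by omega) ?_
          intro m hm hmv'
          exact absurd hmv' (pvMem_diff.mp hm).2
        set w := loopB g d v' with hw
        have hsubw : ∀ x ∈ v', x ∈ w := loopB_subset
        have hkw : (pvUnvis g w).card < k :=
          lt_of_le_of_lt (pvCard_mono g hsubw) hkd
        have h2 : rest.foldl (fun w' m => dfsAF g (f' + 1) m w') w = loopB g rest w := by
          refine IH _ hkw (f' + 1) rest w rfl (by omega) ?_
          intro m hm hmw
          by_cases hmv : m ∈ v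
          · exact pvClosed_mono (fun x hx => hsubw x (hsubv' x hx))
              (hInv m (List.mem_cons_of_mem _ hm) hmv)
          · by_cases hmn : m = n
            · subst hmn
              intro ns' hns'
              rw [hg] at hns'; injection hns' with h; subst h
              rw [pvDiff_eq_nil_iff]
              intro x hx
              by_cases hxv : x ∈ v'
              · exact hsubw x hxv
              · exact loopB_mem g d v' x (pvMem_diff.mpr ⟨hx, hxv⟩)
            · have hmv' : m ∉ v' := by
                intro h
                rcases (PySem.Set.mem_add v n m).mp h with h | h
                · exact hmv h
                · exact hmn h
              exact loopB_closed g d v' m hmw hmv'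
        rw [hstep, h1]
        show List.foldl (fun w m => dfsAF g (f' + 1) m w) w rest =
          loopB g (PySem.Set.diff (PySem.Set.ofList ns) v' ++ rest) v'
        rw [loopB_append, ← hw]
        exact h2
      | none =>
        have hstep : dfsAF g (f' + 1) n v = PySem.Set.add v n := by
          rw [dfsAF]; simp only [hg]
        rw [hstep]
        show List.foldl (fun w m => dfsAF g (f' + 1) m w) (PySem.Set.add v n) rest =
          loopB g rest (PySem.Set.add v n)
        have hInv' : pvInv g (PySem.Set.add v n) rest := by
          intro m hm hmv'
          rcases (PySem.Set.mem_add v n m).mp hmv' with h | h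
          · exact pvClosed_mono hsubv' (hInv m (List.mem_cons_of_mem _ hm) h)
          · subst h
            intro ns' hns'
            rw [hg] at hns'; cases hns'
        rcases Nat.lt_or_eq_of_le (hk ▸ pvCard_add_le g v n) with h | h
        · exact IH _ h (f' + 1) rest _ rfl (by omega) hInv'
        · exact ihl (f' + 1) _ h hf hInv'

theorem pvCard_le_len (g : List (String × List String)) (v : List String) :
    (pvUnvis g v).card ≤ (pvNodes g).length :=
  le_trans (Finset.card_le_card (Finset.sdiff_subset)) (pvNodes g).toFinset_card_le

theorem pvMain (g : List (String × List String)) (start : String) (v0 : PySem.Set String) :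
    dfsAF g ((pvNodes g).length + 2) start v0 =
    loopB g
      (match (PySem.Dict.mk g).get? start with
       | some ns => PySem.Set.diff (PySem.Set.ofList ns) (PySem.Set.add v0 start)
       | none => []) (PySem.Set.add v0 start) := by
  have hfuel : (pvUnvis g (PySem.Set.add v0 start)).card < (pvNodes g).length + 1 :=
    lt_of_le_of_lt (pvCard_le_len g _) (Nat.lt_succ_self _)
  rw [show (pvNodes g).length + 2 = ((pvNodes g).length + 1) + 1 from rfl, dfsAF]
  cases hg : (PySem.Dict.mk g).get? start with
  | some ns =>
    simp only [hg]
    exact pvSim g _ ((pvNodes g).length + 1) _ _ rfl hfuel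
      (fun m hm hmv => absurd hmv (pvMem_diff.mp hm).2)
  | none =>
    simp only [hg]
    simp [loopB]

-- ===== VERDICT (by name: the statement is the Claim_ definition above) =====
theorem dfs_spec : Claim_equal_dfs := by
  intro g start visited _
  unfold Spec_dfs dfs dfs_alt
  cases visited with
  | none => exact pvMain g start PySem.Set.empty
  | some vs => exact pvMain g start (PySem.Set.ofList vs)
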